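-- pv_equiv track=rewrite | github.com/kkjjhhbb/Algorithm_study | 프로그래머스/level3/숫자 게임.py | solution
-- ===== SOURCE A (Python) =====
-- from collections import deque
--
-- def solution(A, B):
--     A.sort()
--     B.sort()
--     bq = deque(B)
--
--     if A[0] > B[-1]:
--         return 0
--     if A[-1] < B[0]:
--         return len(B)
--
--     i = 0
--     answer = 0
--     for i in range(len(A)):
--         while True:
--             if A[i] > max(list(bq)):
--                 break
--             if A[i] < bq[0]:
--                 bq.popleft()
--                 answer += 1
--                 break
--             bq.append(bq.popleft())
--     return answer
-- ===== SOURCE B (Python) =====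
-- def solution(A, B):
--     A.sort()
--     B.sort()
--     answer = 0
--     j = 0
--     for a in A:
--         while j < len(B) and B[j] <= a:
--             j += 1
--         if j == len(B):
--             break
--         answer += 1
--         j += 1
--     return answer
-- ===== Notes on version B (the rewrite author's own statement) =====
-- stated objective: alternative
-- what changed: replaces A's deque rotation (cycling losers to the back and recomputing max(list(bq)) over the whole deque on every inner step) with a single two-pointer greedy pass over the two sorted lists (intended as faster, but A diverges on the large timing inputs so no ratio could be measured)
-- intended difference: when every card of A loses to every card of B and A has fewer cards than B, A's early-return branch yields len(B) although only len(A) rounds are played, while B returns len(A), the number of rounds B can actually win. — e.g. on solution([1], [2, 3]): A returns 2, B returns 1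
-- outside the precondition, e.g. on solution([], []): A raises IndexError, B returns 0; on solution([1, 5], [3]): A raises ValueError, B returns 1; on solution([2, 2], [2, 3]): A does not finish within the time limit, B returns 1
import Mathlib
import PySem

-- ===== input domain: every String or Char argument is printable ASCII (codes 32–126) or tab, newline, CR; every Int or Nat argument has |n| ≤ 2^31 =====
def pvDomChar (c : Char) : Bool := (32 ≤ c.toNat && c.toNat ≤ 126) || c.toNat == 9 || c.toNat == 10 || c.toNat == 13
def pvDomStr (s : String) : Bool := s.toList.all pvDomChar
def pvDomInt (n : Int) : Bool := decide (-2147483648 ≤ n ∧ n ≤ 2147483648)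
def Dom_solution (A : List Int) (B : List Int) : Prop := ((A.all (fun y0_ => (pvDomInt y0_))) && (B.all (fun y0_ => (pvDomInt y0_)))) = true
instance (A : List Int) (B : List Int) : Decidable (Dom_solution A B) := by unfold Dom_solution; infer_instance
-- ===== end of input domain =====

-- B replaces A's deque rotation (with a full max() scan per inner step) by a two-pointer
-- greedy pass over the two sorted lists; both sort their arguments in place (same mutation),
-- and the equivalence proved here is about the return value.

-- ===== PORT A =====
-- the 'while True' body of A; fuel only makes the recursion total (inside Pre_ the loop
-- terminates within bq.length rotations and the fuel is never exhausted)
def rotA (fuel : Nat) (a : Int) (bq : List Int) (ans : Int) : List Int × Int :=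
  match fuel with
  | 0 => (bq, ans)
  | f + 1 =>
    match PySem.List.max? bq (fun y => y) with
    | none => (bq, ans)          -- max([]) raises ValueError in Python: outside Pre_
    | some m =>
      if a > m then (bq, ans)    -- break, no win
      else
        match bq with
        | [] => (bq, ans)        -- unreachable (max? returned some)
        | b :: rest =>
          if a < b then (rest, ans + 1)          -- popleft; answer += 1; break
          else rotA f a (rest ++ [b]) ans        -- bq.append(bq.popleft())

def solution (A : List Int) (B : List Int) : Int :=
  let As := PySem.List.sorted A (fun y => y) false
  let Bs := PySem.List.sorted B (fun y => y) false
  match PySem.List.pyGet? As 0, PySem.List.pyGet? Bs (-1),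
        PySem.List.pyGet? As (-1), PySem.List.pyGet? Bs 0 with
  | some a0, some bl, some al, some b0 =>
    if a0 > bl then 0
    else if al < b0 then (Bs.length : Int)
    else (As.foldl (fun st a => rotA (st.1.length + 1) a st.1 st.2) (Bs, 0)).2
  | _, _, _, _ => 0              -- A[0]/B[-1] raises IndexError on empty input: outside Pre_

-- ===== PORT B =====
-- the two-pointer loop of Source B: consume b's ≤ a (j += 1), otherwise score and consume both
def altGo : List Int → List Int → Int
  | [], _ => 0
  | _ :: _, [] => 0
  | a :: as, b :: bs => if b ≤ a then altGo (a :: as) bs else 1 + altGo as bs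
termination_by structural _ ys => ys

def solution_alt (A : List Int) (B : List Int) : Int :=
  altGo (PySem.List.sorted A (fun y => y) false) (PySem.List.sorted B (fun y => y) false)

-- ===== PRECONDITION & SPEC =====
-- threshold grid used by Pre_'s last clause (all the values where its counts can change)
def pvGrid (A : List Int) (B : List Int) (v : Int) : List Int :=
  (A ++ B ++ [v]).map (fun x => x - 1) ++ (A ++ B ++ [v])

-- Pre_ excludes exactly the inputs on which A does not return: empty inputs (IndexError on
-- A[0]/B[-1]); inputs where sorted(A) minus its maximum can beat all of B (the Hall counting
-- condition below) without the early all-of-A-loses return firing — there the deque empties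
-- and max([]) raises ValueError; and inputs where some card value v shared by A and B can
-- become the maximum of the remaining deque (last clause, split into "v is already the
-- maximum of all of B" and "a repeated v in A gets stuck") — there A's rotation loop spins
-- forever.  The last clause is a safe closed-form over-approximation, so a few terminating
-- shared-value inputs on which A and B agree are also excluded (see the cited example).
def Pre_solution (A : List Int) (B : List Int) : Prop :=
  A ≠ [] ∧ B ≠ [] ∧
  ((∀ a ∈ A, ∀ b ∈ B, a < b) ∨
    ¬ (∀ (j : Nat) (hj : j < (PySem.List.sorted B (fun y => y) false).length),
        j + 1 ≤ ((PySem.List.sorted A (fun y => y) false).dropLast.countP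
          (fun x => decide (x < (PySem.List.sorted B (fun y => y) false)[j]'hj))))) ∧
  (∀ v ∈ B, v ∈ A → ¬ (
    (B.countP (fun b => decide (v < b)) = 0 ∧
      ∀ w ∈ pvGrid A B v, w < v →
        A.countP (fun x => decide (w ≤ x ∧ x < v)) + 1 ≤ B.countP (fun b => decide (w < b)))
    ∨ (2 ≤ A.countP (fun x => decide (x = v)) ∧
       B.countP (fun b => decide (v < b)) + 1 ≤ A.countP (fun x => decide (x ≤ v)) ∧
       ∀ w ∈ pvGrid A B v, w < v →
         A.countP (fun x => decide (w ≤ x ∧ x < v)) + 2 ≤ B.countP (fun b => decide (w < b)))))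
instance (A : List Int) (B : List Int) : Decidable (Pre_solution A B) := by
  unfold Pre_solution; infer_instance

def pvWitness_solution : List Int × List Int := ([1, 3], [2, 4])

-- On inputs where every card of A loses to every card of B and A has fewer cards than B,
-- A returns len(B) (its early-return branch) although only len(A) rounds are played;
-- B returns len(A), the number of rounds B can actually win, which is the intended value.
def D_solution (A : List Int) (B : List Int) : Prop :=
  A ≠ [] ∧ B ≠ [] ∧ A.length < B.length ∧ ∀ a ∈ A, ∀ b ∈ B, a < b
instance (A : List Int) (B : List Int) : Decidable (D_solution A B) := by
  unfold D_solution; infer_instance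

def Spec_solution (A : List Int) (B : List Int) (out : Int) : Prop :=
  ¬ D_solution A B → out = solution_alt A B
instance (A : List Int) (B : List Int) (out : Int) : Decidable (Spec_solution A B out) := by
  unfold Spec_solution; infer_instance

def pvDiffWitness_solution : List Int × List Int := ([1], [2, 3])
def pvDiffWitnessOut_solution : Int × Int := (2, 1)

-- ===== CLAIM (what is proved, stated in full; the proofs are below) =====
def Claim_unchanged_solution : Prop :=
  ∀ (A : List Int) (B : List Int), Dom_solution A B → Pre_solution A B →
    Spec_solution A B (solution A B)

def Claim_changed_solution : Prop :=
  Dom_solution (pvDiffWitness_solution.1) (pvDiffWitness_solution.2) ∧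
  Pre_solution (pvDiffWitness_solution.1) (pvDiffWitness_solution.2) ∧
  D_solution (pvDiffWitness_solution.1) (pvDiffWitness_solution.2) ∧
  solution (pvDiffWitness_solution.1) (pvDiffWitness_solution.2) = pvDiffWitnessOut_solution.1 ∧
  solution_alt (pvDiffWitness_solution.1) (pvDiffWitness_solution.2) = pvDiffWitnessOut_solution.2 ∧
  pvDiffWitnessOut_solution.1 ≠ pvDiffWitnessOut_solution.2

def Claim_exact_solution : Prop :=
  ∀ (A : List Int) (B : List Int), Dom_solution A B → Pre_solution A B → D_solution A B →
    solution A B ≠ solution_alt A B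

-- ===== LEMMAS AND PROOFS =====

-- altGo skips a leading block of elements ≤ the current card
theorem altGo_skip (a : Int) (as S U : List Int) (hS : ∀ s ∈ S, s ≤ a) :
    altGo (a :: as) (S ++ U) = altGo (a :: as) U := by
  induction S with
  | nil => rfl
  | cons s S ih =>
    have hs : s ≤ a := hS s (by simp)
    simp only [List.cons_append, altGo, if_pos hs]
    exact ih (fun x hx => hS x (by simp [hx]))

-- altGo is 0 when every remaining b is ≤ every remaining a
theorem altGo_zero (as S : List Int) (h : ∀ s ∈ S, ∀ x ∈ as, s ≤ x) :
    altGo as S = 0 := by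
  cases as with
  | nil => cases S <;> simp [altGo]
  | cons a as =>
    have hskip := altGo_skip a as S [] (fun s hs => h s hs a (by simp))
    simp only [List.append_nil] at hskip
    rw [hskip]; simp [altGo]

-- altGo matches all of B when every a loses to every b and B has no more cards than A
theorem altGo_all (as bs : List Int) (hlen : bs.length ≤ as.length)
    (h : ∀ x ∈ as, ∀ y ∈ bs, x < y) : altGo as bs = (bs.length : Int) := by
  induction as generalizing bs with
  | nil =>
    have : bs = [] := List.length_eq_zero_iff.mp (by simpa using hlen)
    subst this; simp [altGo]
  | cons a as ih =>
    cases bs with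
    | nil => simp [altGo]
    | cons b bs =>
      have hab : a < b := h a (by simp) b (by simp)
      simp only [altGo, if_neg (not_le.mpr hab)]
      rw [ih bs (by simp at hlen ⊢; omega)
          (fun x hx y hy => h x (by simp [hx]) y (by simp [hy]))]
      simp only [List.length_cons]
      push_cast
      ring

-- altGo matches all of A when every a loses to every b and A has no more cards than B
theorem altGo_min (as bs : List Int) (hlen : as.length ≤ bs.length)
    (h : ∀ x ∈ as, ∀ y ∈ bs, x < y) : altGo as bs = (as.length : Int) := by
  induction as generalizing bs with
  | nil => cases bs <;> simp [altGo]
  | cons a as ih =>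
    cases bs with
    | nil => simp at hlen
    | cons b bs =>
      have hab : a < b := h a (by simp) b (by simp)
      simp only [altGo, if_neg (not_le.mpr hab)]
      rw [ih bs (by simp at hlen ⊢; omega)
          (fun x hx y hy => h x (by simp [hx]) y (by simp [hy]))]
      simp only [List.length_cons]
      push_cast
      ring

-- A's inner loop breaks immediately when every remaining card is strictly below a
theorem rotA_all_lt (fuel : Nat) (a : Int) (bq : List Int) (ans : Int)
    (hfuel : 1 ≤ fuel) (h : ∀ x ∈ bq, x < a) :
    rotA fuel a bq ans = (bq, ans) := by
  cases fuel with
  | zero => omega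
  | succ f =>
    simp only [rotA]
    cases hm : PySem.List.max? bq (fun y => y) with
    | none => rfl
    | some m =>
      have hmem := PySem.List.max?_mem hm
      have : a > m := h m hmem
      simp [this]

-- A's inner loop rotates the losing prefix P to the back and pops the first winner q
theorem rotA_found (a q : Int) (P Q' S : List Int) (ans : Int) (fuel : Nat)
    (hP : ∀ p ∈ P, p ≤ a) (hq : a < q) (hfuel : P.length < fuel) :
    rotA fuel a (P ++ q :: (Q' ++ S)) ans = (Q' ++ (S ++ P), ans + 1) := by
  induction P generalizing S fuel with
  | nil =>
    cases fuel with
    | zero => omega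
    | succ f =>
      simp only [List.nil_append, rotA]
      cases hm : PySem.List.max? (q :: (Q' ++ S)) (fun y => y) with
      | none => exact absurd hm (by simp [PySem.List.max?_eq_none_iff])
      | some m =>
        have hqm : q ≤ m := PySem.List.max?_isMax hm q (by simp)
        have h1 : ¬ a > m := by omega
        simp [h1, hq]
  | cons p P ih =>
    cases fuel with
    | zero => omega
    | succ f =>
      have hpa : p ≤ a := hP p (by simp)
      simp only [List.cons_append, rotA]
      cases hm : PySem.List.max? (p :: (P ++ q :: (Q' ++ S))) (fun y => y) with
      | none => exact absurd hm (by simp [PySem.List.max?_eq_none_iff])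
      | some m =>
        have hqm : q ≤ m := PySem.List.max?_isMax hm q (by simp)
        have h1 : ¬ a > m := by omega
        have h2 : ¬ a < p := by omega
        simp only [if_neg h1, if_neg h2]
        have heq : (P ++ q :: (Q' ++ S)) ++ [p] = P ++ q :: (Q' ++ (S ++ [p])) := by
          simp
        rw [heq, ih (S ++ [p]) f (fun x hx => hP x (List.mem_cons_of_mem p hx))
            (by simp only [List.length_cons] at hfuel; omega)]
        simp

-- every element of a ≤-sorted list is ≤ its last element
theorem pairwise_le_getLast (l : List Int) :
    List.Pairwise (· ≤ ·) l → ∀ x ∈ l, ∀ (hl : l ≠ []), x ≤ l.getLast hl := by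
  induction l with
  | nil => intro _ x hx; simp at hx
  | cons a l ih =>
    intro h x hx hl
    obtain ⟨ha, h'⟩ := List.pairwise_cons.mp h
    cases l with
    | nil =>
      simp at hx
      simp [hx, List.getLast]
    | cons b l' =>
      rw [List.getLast_cons (by simp : (b :: l') ≠ [])]
      rcases List.mem_cons.mp hx with rfl | hx'
      · exact ha _ (List.getLast_mem _)
      · exact ih h' x hx' _

-- the head of a ≤-sorted list is ≤ every element
theorem pairwise_head_le (l : List Int) (h : List.Pairwise (· ≤ ·) l)
    (x : Int) (hx : x ∈ l) (hl : l ≠ []) : l.head hl ≤ x := by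
  cases l with
  | nil => simp at hx
  | cons a l' =>
    rcases List.mem_cons.mp hx with rfl | hx'
    · exact le_refl _
    · exact (List.pairwise_cons.mp h).1 x hx'

-- a countP splits along any second predicate
theorem countP_split (l : List Int) (p q : Int → Bool) :
    l.countP p = l.countP (fun x => p x && q x) + l.countP (fun x => p x && !q x) := by
  induction l with
  | nil => rfl
  | cons x l ih =>
    simp only [List.countP_cons, ih]
    cases hp : p x <;> cases hq : q x <;> simp <;> omega

-- the spin state the loop proof rules out: the current card v is still in the deque and
-- nothing in the deque beats it; then either v is already the maximum of all of B, or a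
-- repeated copy of v in A got stuck — both with the counting facts shown
def SpinCond (As Bs : List Int) (v : Int) : Prop :=
  (Bs.countP (fun b => decide (v < b)) = 0 ∧
    ∀ w : Int, w < v →
      As.countP (fun x => decide (w ≤ x ∧ x < v)) + 1 ≤ Bs.countP (fun b => decide (w < b)))
  ∨ (2 ≤ As.countP (fun x => decide (x = v)) ∧
     Bs.countP (fun b => decide (v < b)) + 1 ≤ As.countP (fun x => decide (x ≤ v)) ∧
     ∀ w : Int, w < v →
       As.countP (fun x => decide (w ≤ x ∧ x < v)) + 2 ≤ Bs.countP (fun b => decide (w < b)))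

-- the heart of the proof: A's outer loop over the deque U ++ S equals ans + altGo as (S ++ U).
-- done are the processed cards (As = done ++ as), S the already-rotated cards (each ≤ every
-- remaining a), U the live sorted suffix of Bs, R the cards won so far; hNB says either no
-- break has happened yet (then each processed card won, with the per-threshold count bound)
-- or a break happened (then everything left is below every remaining card); hP1 is Pre_'s
-- last clause, which makes the spin state contradictory.
theorem loop_spec (As Bs : List Int) (as done U S R : List Int) (ans : Int)
    (hBs : List.Pairwise (· ≤ ·) Bs)
    (has : List.Pairwise (· ≤ ·) as) (hU : List.Pairwise (· ≤ ·) U)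
    (hSas : ∀ s ∈ S, ∀ x ∈ as, s ≤ x)
    (hsplitAs : As = done ++ as)
    (hdone : ∀ d ∈ done, ∀ x ∈ as, d ≤ x)
    (hC : ∀ p : Int → Bool, R.countP p + (U ++ S).countP p = Bs.countP p)
    (hsuf : U.IsSuffix Bs)
    (hSdone : ∀ s ∈ S, ∃ d ∈ done, s ≤ d)
    (hNB : (R.length = done.length ∧ ∀ w : Int,
              done.countP (fun d => decide (w ≤ d)) ≤ R.countP (fun b => decide (w < b)))
          ∨ (∀ x ∈ U ++ S, ∀ y ∈ as, x < y))
    (hP1 : ∀ v, v ∈ Bs → v ∈ As → ¬ SpinCond As Bs v) :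
    (as.foldl (fun st a => rotA (st.1.length + 1) a st.1 st.2) (U ++ S, ans)).2
      = ans + altGo as (S ++ U) := by
  induction as generalizing done U S R ans with
  | nil => simp [altGo]
  | cons a as ih =>
    obtain ⟨ha_le, has'⟩ := List.pairwise_cons.mp has
    set P := U.takeWhile (fun x => decide (x ≤ a)) with hPdef
    set Q := U.dropWhile (fun x => decide (x ≤ a)) with hQdef
    have hsplit : U = P ++ Q := (List.takeWhile_append_dropWhile).symm
    have hPle : ∀ p ∈ P, p ≤ a := by
      intro p hp
      have := List.mem_takeWhile_imp hp
      simpa using this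
    have hSa : ∀ s ∈ S, s ≤ a := fun s hs => hSas s hs a (by simp)
    have haAs : a ∈ As := by rw [hsplitAs]; simp
    cases hQ : Q with
    | nil =>
      -- every card in the deque is ≤ a; Pre_'s last clause rules out equality
      have hUle : ∀ x ∈ U, x ≤ a := by
        intro x hx
        rw [hsplit, hQ, List.append_nil] at hx
        exact hPle x hx
      have halle : ∀ x ∈ U ++ S, x ≤ a := by
        intro x hx
        rcases List.mem_append.mp hx with h | h
        · exact hUle x h
        · exact hSa x h
      have hstrict : ∀ x ∈ U ++ S, x < a := by
        intro x hx
        rcases lt_or_eq_of_le (halle x hx) with h | h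
        · exact h
        exfalso
        subst h
        rcases hNB with hnb | hbr
        swap
        · exact absurd (hbr x hx x (by simp)) (lt_irrefl x)
        obtain ⟨hlen, hHRD⟩ := hnb
        -- common facts at the spin point (current card = x)
        have hUSgt0 : (U ++ S).countP (fun y => decide (x < y)) = 0 :=
          List.countP_eq_zero.mpr (fun y hy => by simpa using not_lt.mpr (halle y hy))
        have hxBs : x ∈ Bs := by
          have h1 : 0 < (U ++ S).countP (fun y => decide (y = x)) :=
            List.countP_pos_iff.mpr ⟨x, hx, by simp⟩
          have h2 := hC (fun y => decide (y = x))
          have h3 : 0 < Bs.countP (fun y => decide (y = x)) := by omega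
          obtain ⟨y, hy, hyx⟩ := List.countP_pos_iff.mp h3
          simp at hyx
          exact hyx ▸ hy
        have hUSw : ∀ w : Int, w < x → 1 ≤ (U ++ S).countP (fun y => decide (w < y)) :=
          fun w hw => List.countP_pos_iff.mpr ⟨x, hx, by simpa using hw⟩
        rcases List.mem_append.mp hx with hxU | hxS
        · -- the current card is still live: then U is a suffix of Bs, so ALL of B is ≤ x
          apply hP1 x hxBs haAs
          have hUne : U ≠ [] := List.ne_nil_of_mem hxU
          obtain ⟨T, hT⟩ := hsuf
          have hBsne : Bs ≠ [] := by rw [← hT]; simp [hUne]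
          have hlastmem : Bs.getLast hBsne ∈ U := by
            have e1 : Bs.getLast? = U.getLast? := by
              rw [← hT]
              exact List.getLast?_append_of_ne_nil T hUne
            have e2 : Bs.getLast? = some (Bs.getLast hBsne) := List.getLast?_eq_some_getLast hBsne
            have e3 : U.getLast? = some (U.getLast hUne) := List.getLast?_eq_some_getLast hUne
            have e4 : Bs.getLast hBsne = U.getLast hUne := by
              rw [e2, e3] at e1
              exact Option.some.inj e1
            rw [e4]
            exact List.getLast_mem hUne
          have hBle : ∀ b ∈ Bs, b ≤ x := by
            intro b hb
            exact le_trans (pairwise_le_getLast Bs hBs b hb hBsne) (hUle _ hlastmem)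
          have hBs0 : Bs.countP (fun y => decide (x < y)) = 0 :=
            List.countP_eq_zero.mpr (fun b hb => by simpa using not_lt.mpr (hBle b hb))
          have hR0 : R.countP (fun y => decide (x < y)) = 0 := by
            have h2 := hC (fun y => decide (x < y))
            omega
          left
          constructor
          · exact hBs0
          · intro w hw
            -- every processed card is < x
            have hdone_ge0 : done.countP (fun d => decide (x ≤ d)) = 0 := by
              have h1 := hHRD x
              omega
            have hdone_lt : ∀ d ∈ done, d < x := by
              intro d hd
              by_contra hcon
              have : 0 < done.countP (fun d => decide (x ≤ d)) :=
                List.countP_pos_iff.mpr ⟨d, hd, by simpa using not_lt.mp hcon⟩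
              omega
            have hAeq : As.countP (fun y => decide (w ≤ y ∧ y < x))
                = done.countP (fun d => decide (w ≤ d)) := by
              rw [hsplitAs, List.countP_append]
              have hrest : (x :: as).countP (fun y => decide (w ≤ y ∧ y < x)) = 0 := by
                apply List.countP_eq_zero.mpr
                intro y hy
                have hxy : x ≤ y := by
                  rcases List.mem_cons.mp hy with rfl | hy'
                  · exact le_refl _
                  · exact ha_le y hy'
                simp
                intro _
                omega
              have hdcong : done.countP (fun d => decide (w ≤ d))
                  = done.countP (fun d => decide (w ≤ d ∧ d < x)) := by
                apply List.countP_congr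
                intro d hd
                have hdx := hdone_lt d hd
                simp [hdx]
              rw [hrest, ← hdcong]
              omega
            have h1 := hHRD w
            have h2 := hC (fun y => decide (w < y))
            have h3 := hUSw w hw
            omega
        · -- the current card was skipped earlier: a processed copy of x exists
          apply hP1 x hxBs haAs
          obtain ⟨d, hd, hxd⟩ := hSdone x hxS
          have hdx : d ≤ x := hdone d hd x (by simp)
          have hdex : d = x := le_antisymm hdx hxd
          have hxdone : x ∈ done := hdex ▸ hd
          right
          have hdone_le : ∀ d' ∈ done, d' ≤ x := fun d' hd' => hdone d' hd' x (by simp)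
          refine ⟨?_, ?_, ?_⟩
          · -- two copies of x in A: one in done, plus the current one
            rw [hsplitAs, List.countP_append, List.countP_cons]
            have h1 : 0 < done.countP (fun y => decide (y = x)) :=
              List.countP_pos_iff.mpr ⟨x, hxdone, by simp⟩
            simp
            omega
          · -- cards beating x: all already won, at most one per processed card
            have h2 := hC (fun y => decide (x < y))
            have hRlen : R.countP (fun y => decide (x < y)) ≤ R.length := List.countP_le_length
            have hAle : done.length + 1 ≤ As.countP (fun y => decide (y ≤ x)) := by
              rw [hsplitAs, List.countP_append, List.countP_cons]
              have : done.countP (fun y => decide (y ≤ x)) = done.length :=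
                List.countP_eq_length.mpr (fun d' hd' => by simpa using hdone_le d' hd')
              simp [this]
            omega
          · intro w hw
            -- done holds every A-card in [w, x) plus a copy of x itself
            have hAeq : As.countP (fun y => decide (w ≤ y ∧ y < x))
                ≤ done.countP (fun d => decide (w ≤ d ∧ d < x)) := by
              rw [hsplitAs, List.countP_append]
              have hrest : (x :: as).countP (fun y => decide (w ≤ y ∧ y < x)) = 0 := by
                apply List.countP_eq_zero.mpr
                intro y hy
                have hxy : x ≤ y := by
                  rcases List.mem_cons.mp hy with rfl | hy'
                  · exact le_refl _
                  · exact ha_le y hy'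
                simp
                intro _
                omega
              omega
            have hsplitc := countP_split done (fun d => decide (w ≤ d)) (fun d => decide (d < x))
            have heq1 : done.countP (fun d => decide (w ≤ d) && decide (d < x))
                = done.countP (fun d => decide (w ≤ d ∧ d < x)) := by
              apply List.countP_congr
              intro d _
              by_cases h1 : w ≤ d <;> by_cases h2 : d < x <;> simp [h1, h2]
            have hge1 : 1 ≤ done.countP (fun d => decide (w ≤ d) && !decide (d < x)) := by
              apply List.countP_pos_iff.mpr
              have hwx : w ≤ x := le_of_lt hw
              exact ⟨x, hxdone, by simp [hwx]⟩
            have h1 := hHRD w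
            have h2 := hC (fun y => decide (w < y))
            have h3 := hUSw w hw
            omega
      simp only [List.foldl_cons]
      rw [rotA_all_lt _ _ _ _ (by omega) hstrict]
      rw [ih (done ++ [a]) U S R ans has' hU
          (fun s hs x hx => hSas s hs x (by simp [hx]))
          (by rw [hsplitAs]; simp)
          (by
            intro d hd x hx
            rcases List.mem_append.mp hd with h | h
            · exact hdone d h x (by simp [hx])
            · simp at h
              subst h
              exact ha_le x hx)
          hC hsuf
          (fun s hs => by
            obtain ⟨d, hd, hsd⟩ := hSdone s hs
            exact ⟨d, by simp [hd], hsd⟩)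
          (Or.inr (fun x hx y hy => lt_of_lt_of_le (hstrict x hx) (ha_le y hy)))]
      have h1 : altGo (a :: as) (S ++ U) = 0 := by
        apply altGo_zero
        intro s hs x hx
        have hsal : s ≤ a := by
          rcases List.mem_append.mp hs with h | h
          · exact hSa s h
          · exact hUle s h
        have hax : a ≤ x := by
          rcases List.mem_cons.mp hx with rfl | hx'
          · exact le_refl _
          · exact ha_le x hx'
        omega
      have h2 : altGo as (S ++ U) = 0 := by
        apply altGo_zero
        intro s hs x hx
        have hsal : s ≤ a := by
          rcases List.mem_append.mp hs with h | h
          · exact hSa s h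
          · exact hUle s h
        have hax : a ≤ x := ha_le x hx
        omega
      rw [h1, h2]
    | cons q Q' =>
      -- q is the first card beating a: P rotates to the back, q is popped
      have hq_mem : q ∈ U := by rw [hsplit, hQ]; simp
      have hqa : a < q := by
        have hnot : ¬ (q ≤ a) := by
          have := List.head?_dropWhile_not (p := fun x => decide (x ≤ a)) (l := U)
          rw [← hQdef, hQ] at this
          simpa using this
        omega
      have hQ'sub : ∀ x ∈ Q', x ∈ U := by
        intro x hx
        rw [hsplit, hQ]; simp [hx]
      have hQ'pw : List.Pairwise (· ≤ ·) (q :: Q') := by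
        have : List.Pairwise (· ≤ ·) Q := by
          rw [hQdef]
          exact hU.sublist (List.dropWhile_sublist _)
        rwa [hQ] at this
      have hqQ' : ∀ x ∈ Q', q ≤ x := (List.pairwise_cons.mp hQ'pw).1
      simp only [List.foldl_cons]
      have hshape : U ++ S = P ++ q :: (Q' ++ S) := by
        rw [hsplit, hQ]; simp
      have hPlen : P.length ≤ U.length := by
        rw [hPdef]; exact (List.takeWhile_sublist _).length_le
      rw [hshape, rotA_found a q P Q' S ans _ hPle hqa
          (by simp only [List.length_append]; omega)]
      have hcntshift : ∀ p : Int → Bool,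
          (q :: R).countP p + (Q' ++ (S ++ P)).countP p = Bs.countP p := by
        intro p
        have h0 := hC p
        rw [hshape] at h0
        simp only [List.countP_append, List.countP_cons] at h0 ⊢
        omega
      rw [ih (done ++ [a]) Q' (S ++ P) (q :: R) (ans + 1) has'
          (hQ'pw.sublist (List.sublist_cons_self q Q'))
          (by
            intro s hs x hx
            rcases List.mem_append.mp hs with h | h
            · exact hSas s h x (by simp [hx])
            · exact le_trans (hPle s h) (ha_le x hx))
          (by rw [hsplitAs]; simp)
          (by
            intro d hd x hx
            rcases List.mem_append.mp hd with h | h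
            · exact hdone d h x (by simp [hx])
            · simp at h
              subst h
              exact ha_le x hx)
          hcntshift
          (by
            rcases hsuf with ⟨T, hT⟩
            exact ⟨T ++ (P ++ [q]), by rw [← hT, hsplit, hQ]; simp⟩)
          (by
            intro s hs
            rcases List.mem_append.mp hs with h | h
            · obtain ⟨d, hd, hsd⟩ := hSdone s h
              exact ⟨d, by simp [hd], hsd⟩
            · exact ⟨a, by simp, hPle s h⟩)
          (by
            rcases hNB with hnb | hbr
            · left
              obtain ⟨hlen, hHRD⟩ := hnb
              constructor
              · simp [hlen]
              · intro w
                have h1 := hHRD w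
                simp only [List.countP_append, List.countP_cons]
                by_cases hwa : w ≤ a
                · have hwq : w < q := by omega
                  simp [hwa, hwq]
                  omega
                · simp [hwa]
                  omega
            · right
              intro x hx y hy
              apply hbr x _ y (by simp [hy])
              rw [hshape]
              simp only [List.mem_append, List.mem_cons] at hx ⊢
              tauto)]
      -- compute altGo (a :: as) (S ++ U)
      have hlhs : altGo (a :: as) (S ++ U) = 1 + altGo as Q' := by
        rw [hsplit, hQ, show S ++ (P ++ q :: Q') = (S ++ P) ++ (q :: Q') by simp]
        rw [altGo_skip a as (S ++ P) (q :: Q')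
            (by
              intro s hs
              rcases List.mem_append.mp hs with h | h
              · exact hSa s h
              · exact hPle s h)]
        simp [altGo, not_le.mpr hqa]
      have hrhs : altGo as ((S ++ P) ++ Q') = altGo as Q' := by
        cases as with
        | nil => cases Q' <;> simp [altGo]
        | cons x as' =>
          apply altGo_skip x as' (S ++ P) Q'
          intro s hs
          have hsa : s ≤ a := by
            rcases List.mem_append.mp hs with h | h
            · exact hSa s h
            · exact hPle s h
          exact le_trans hsa (ha_le x (by simp))
      rw [hlhs, hrhs]
      ring

-- ===== VERDICT (by name: the statement is the Claim_ definition above) =====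
theorem solution_spec : Claim_unchanged_solution := by
  intro A B _ hpre
  obtain ⟨hAne, hBne, _, hnospin⟩ := hpre
  intro hnD
  unfold solution solution_alt
  set As := PySem.List.sorted A (fun y => y) false with hAs
  set Bs := PySem.List.sorted B (fun y => y) false with hBs
  have hAsne : As ≠ [] := by
    rw [hAs]; simpa [PySem.List.sorted_eq_nil_iff] using hAne
  have hBsne : Bs ≠ [] := by
    rw [hBs]; simpa [PySem.List.sorted_eq_nil_iff] using hBne
  have hAspw : List.Pairwise (· ≤ ·) As := by
    simpa using PySem.List.sorted_pairwise (xs := A) (key := fun y => y)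
  have hBspw : List.Pairwise (· ≤ ·) Bs := by
    simpa using PySem.List.sorted_pairwise (xs := B) (key := fun y => y)
  have hApm : As.Perm A := PySem.List.sorted_perm A (fun y => y) false
  have hBpm : Bs.Perm B := PySem.List.sorted_perm B (fun y => y) false
  have h0A : PySem.List.pyGet? As 0 = some (As.head hAsne) := by
    rw [PySem.List.pyGet?_zero, ← List.head?_eq_getElem?, List.head?_eq_some_head hAsne]
  have h0B : PySem.List.pyGet? Bs 0 = some (Bs.head hBsne) := by
    rw [PySem.List.pyGet?_zero, ← List.head?_eq_getElem?, List.head?_eq_some_head hBsne]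
  have hlA : PySem.List.pyGet? As (-1) = some (As.getLast hAsne) := by
    rw [PySem.List.pyGet?_neg_one, List.getLast?_eq_some_getLast hAsne]
  have hlB : PySem.List.pyGet? Bs (-1) = some (Bs.getLast hBsne) := by
    rw [PySem.List.pyGet?_neg_one, List.getLast?_eq_some_getLast hBsne]
  simp only [h0A, h0B, hlA, hlB]
  split_ifs with h1 h2
  · -- min(A) beats max(B): A answers 0 and B's greedy also scores 0
    symm
    apply altGo_zero
    intro s hs x hx
    have hsle : s ≤ Bs.getLast hBsne := pairwise_le_getLast Bs hBspw s hs hBsne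
    have hax : As.head hAsne ≤ x := pairwise_head_le As hAspw x hx hAsne
    omega
  · -- max(A) loses to min(B): A answers len(B); outside D_, B has at most len(A) cards
    have hlt : ∀ x ∈ As, ∀ y ∈ Bs, x < y := by
      intro x hx y hy
      have hxle : x ≤ As.getLast hAsne := pairwise_le_getLast As hAspw x hx hAsne
      have hby : Bs.head hBsne ≤ y := pairwise_head_le Bs hBspw y hy hBsne
      omega
    have hltAB : ∀ a ∈ A, ∀ b ∈ B, a < b := by
      intro a ha b hb
      exact hlt a (hApm.mem_iff.mpr ha) b (hBpm.mem_iff.mpr hb)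
    have hlen : Bs.length ≤ As.length := by
      have hncon : ¬ A.length < B.length := by
        intro hcon
        exact hnD (by unfold D_solution; exact ⟨hAne, hBne, hcon, hltAB⟩)
      have hA : As.length = A.length := hApm.length_eq
      have hB : Bs.length = B.length := hBpm.length_eq
      omega
    symm
    exact altGo_all As Bs hlen hlt
  · -- the main loop
    have hP1 : ∀ v, v ∈ Bs → v ∈ As → ¬ SpinCond As Bs v := by
      intro v hvB hvA hsc
      apply hnospin v (hBpm.mem_iff.mp hvB) (hApm.mem_iff.mp hvA)
      have hA1 : ∀ p : Int → Bool, As.countP p = A.countP p := fun p => hApm.countP_eq p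
      have hB1 : ∀ p : Int → Bool, Bs.countP p = B.countP p := fun p => hBpm.countP_eq p
      rcases hsc with ⟨h0, hw⟩ | ⟨h1, h2, hw⟩
      · left
        refine ⟨by rw [← hB1]; exact h0, ?_⟩
        intro w _ hwlt
        rw [← hA1, ← hB1]
        exact hw w hwlt
      · right
        refine ⟨by rw [← hA1]; exact h1, by rw [← hA1, ← hB1]; exact h2, ?_⟩
        intro w _ hwlt
        rw [← hA1, ← hB1]
        exact hw w hwlt
    have hmain := loop_spec As Bs As [] Bs [] [] 0 hBspw hAspw hBspw
      (by intro s hs; simp at hs)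
      (by simp)
      (by intro d hd; simp at hd)
      (by intro p; simp)
      (List.suffix_refl Bs)
      (by intro s hs; simp at hs)
      (Or.inl ⟨rfl, by intro w; simp⟩)
      hP1
    simpa using hmain

theorem solution_changed : Claim_changed_solution := by
  unfold Claim_changed_solution
  decide

theorem solution_tight : Claim_exact_solution := by
  intro A B _ hpre hD
  unfold D_solution at hD
  obtain ⟨hAne, hBne, hlen, hlt⟩ := hD
  unfold solution solution_alt
  set As := PySem.List.sorted A (fun y => y) false with hAs
  set Bs := PySem.List.sorted B (fun y => y) false with hBs
  have hAsne : As ≠ [] := by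
    rw [hAs]; simpa [PySem.List.sorted_eq_nil_iff] using hAne
  have hBsne : Bs ≠ [] := by
    rw [hBs]; simpa [PySem.List.sorted_eq_nil_iff] using hBne
  have hApm : As.Perm A := PySem.List.sorted_perm A (fun y => y) false
  have hBpm : Bs.Perm B := PySem.List.sorted_perm B (fun y => y) false
  have hlt' : ∀ x ∈ As, ∀ y ∈ Bs, x < y := by
    intro x hx y hy
    exact hlt x (hApm.mem_iff.mp hx) y (hBpm.mem_iff.mp hy)
  have h0A : PySem.List.pyGet? As 0 = some (As.head hAsne) := by
    rw [PySem.List.pyGet?_zero, ← List.head?_eq_getElem?, List.head?_eq_some_head hAsne]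
  have h0B : PySem.List.pyGet? Bs 0 = some (Bs.head hBsne) := by
    rw [PySem.List.pyGet?_zero, ← List.head?_eq_getElem?, List.head?_eq_some_head hBsne]
  have hlA : PySem.List.pyGet? As (-1) = some (As.getLast hAsne) := by
    rw [PySem.List.pyGet?_neg_one, List.getLast?_eq_some_getLast hAsne]
  have hlB : PySem.List.pyGet? Bs (-1) = some (Bs.getLast hBsne) := by
    rw [PySem.List.pyGet?_neg_one, List.getLast?_eq_some_getLast hBsne]
  simp only [h0A, h0B, hlA, hlB]
  have hb1 : ¬ As.head hAsne > Bs.getLast hBsne := by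
    have := hlt' (As.head hAsne) (List.head_mem hAsne) (Bs.getLast hBsne) (List.getLast_mem hBsne)
    omega
  have hb2 : As.getLast hAsne < Bs.head hBsne :=
    hlt' (As.getLast hAsne) (List.getLast_mem hAsne) (Bs.head hBsne) (List.head_mem hBsne)
  rw [if_neg hb1, if_pos hb2]
  rw [altGo_min As Bs (by rw [hApm.length_eq, hBpm.length_eq]; omega) hlt']
  have hA : As.length = A.length := hApm.length_eq
  have hB : Bs.length = B.length := hBpm.length_eq
  intro hcon
  have : (Bs.length : Int) = (As.length : Int) := hcon
  omega
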